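-- pv_equiv track=rewrite | github.com/chgogos/dituoi_msc_aads | subsequences1.py | all_subsequences
-- ===== SOURCE A (Python) =====
-- def all_subsequences(s):
--     subsequences = set()
--     for i in range(1, 2 ** len(s)):
--         subsequence = []
--         for k in range(len(s)):
--             if i & 1 << k:  # είναι 1 το k-οστό bit του i?
--                 subsequence.append(s[k])
--         subsequences.add("".join(subsequence))
--     return sorted(subsequences)
-- ===== SOURCE B (Python) =====
-- def all_subsequences(s):
--     result = {""}
--     for c in s:
--         result |= {x + c for x in result}
--     result.discard("")
--     return sorted(result)
-- ===== Notes on version B (the rewrite author's own statement) =====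
-- stated objective: alternative
-- what changed: Builds the set of subsequences incrementally, extending every already-collected subsequence by each successive character, instead of enumerating all 2^n bitmasks and scanning every bit position of each mask.
import Mathlib
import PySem

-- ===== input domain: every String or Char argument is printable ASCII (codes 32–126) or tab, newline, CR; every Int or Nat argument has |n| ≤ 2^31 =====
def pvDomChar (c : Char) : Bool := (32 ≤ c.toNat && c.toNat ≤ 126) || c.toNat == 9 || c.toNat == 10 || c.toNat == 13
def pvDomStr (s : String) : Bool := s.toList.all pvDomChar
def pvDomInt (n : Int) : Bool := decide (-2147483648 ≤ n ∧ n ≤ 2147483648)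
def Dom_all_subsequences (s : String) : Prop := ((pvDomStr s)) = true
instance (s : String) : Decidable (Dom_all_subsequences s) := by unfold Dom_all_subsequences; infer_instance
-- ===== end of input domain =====

-- B replaces A's 2^n-bitmask enumeration by growing the set of subsequences one character at a time (alternative algorithm, same return value).

-- ===== PORT A =====
def all_subsequences (s : String) : List String :=
  let n : Int := PySem.Str.len s
  let subsequences : PySem.Set String :=
    (PySem.List.pyRange 1 (2 ^ n.toNat) 1).foldl
      (fun subsequences i =>
        let subsequence : List Char :=
          (PySem.List.pyRange 0 n 1).foldl
            (fun subsequence k =>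
              if PySem.Int.band i (1 <<< k.toNat) ≠ 0 then
                subsequence ++ [PySem.List.pyGetD s.toList k ' ']
              else subsequence) []
        PySem.Set.add subsequences (String.ofList subsequence))
      PySem.Set.empty
  PySem.List.sorted subsequences (fun x => x) false

-- ===== PORT B =====
def all_subsequences_alt (s : String) : List String :=
  let result : PySem.Set String :=
    s.toList.foldl
      (fun result c =>
        PySem.Set.union result (PySem.Set.ofList (result.map (fun x => x ++ String.ofList [c]))))
      (PySem.Set.ofList [""])
  PySem.List.sorted (PySem.Set.discard result "") (fun x => x) false

-- ===== PRECONDITION & SPEC =====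
def Spec_all_subsequences (s : String) (out : List String) : Prop := out = all_subsequences_alt s
instance (s : String) (out : List String) : Decidable (Spec_all_subsequences s out) := by unfold Spec_all_subsequences; infer_instance

-- ===== CLAIM (what is proved, stated in full; the proofs are below) =====
def Claim_equal_all_subsequences : Prop := ∀ (s : String), Dom_all_subsequences s → Spec_all_subsequences s (all_subsequences s)

-- ===== LEMMAS AND PROOFS =====

/-- The sublist of `cs` selected by the bits of `m` (bit `k` selects `cs[k]`). -/
def pvSelect : List Char → Nat → List Char
  | [], _ => []
  | c :: cs, m => (if m % 2 = 1 then [c] else []) ++ pvSelect cs (m / 2)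

theorem pvSelect_zero (cs : List Char) : pvSelect cs 0 = [] := by
  induction cs with
  | nil => rfl
  | cons c cs ih => simp [pvSelect, ih]

theorem pvSelect_sublist (cs : List Char) (m : Nat) : (pvSelect cs m).Sublist cs := by
  induction cs generalizing m with
  | nil => simp [pvSelect]
  | cons c cs ih =>
    by_cases h : m % 2 = 1 <;> simp [pvSelect, h]
    · exact ih (m / 2)
    · exact (ih (m / 2)).cons c

theorem pvSelect_eq_nil {cs : List Char} {m : Nat} (hm : m < 2 ^ cs.length)
    (h : pvSelect cs m = []) : m = 0 := by
  induction cs generalizing m with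
  | nil => simpa using hm
  | cons c cs ih =>
    simp only [pvSelect, List.append_eq_nil_iff] at h
    by_cases h2 : m % 2 = 1
    · simp [h2] at h
    · have := ih (m := m / 2) (by
        have : m < 2 * 2 ^ cs.length := by simpa [pow_succ, Nat.mul_comm] using hm
        omega) h.2
      omega

theorem pvSelect_surj (cs : List Char) (l : List Char) (h : l.Sublist cs) :
    ∃ m, m < 2 ^ cs.length ∧ pvSelect cs m = l := by
  induction cs generalizing l with
  | nil => exact ⟨0, by simp, by simpa [pvSelect] using (List.sublist_nil.mp h).symm ▸ rfl⟩
  | cons c cs ih =>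
    rcases List.sublist_cons_iff.mp h with h' | ⟨r, rfl, hr⟩
    · rcases ih l h' with ⟨m, hm, hsel⟩
      refine ⟨2 * m, ?_, ?_⟩
      · have : 2 * m < 2 * 2 ^ cs.length := by omega
        simpa [pow_succ, Nat.mul_comm] using this
      · simp [pvSelect, Nat.mul_mod_right, hsel]
    · rcases ih r hr with ⟨m, hm, hsel⟩
      refine ⟨2 * m + 1, ?_, ?_⟩
      · have : 2 * m + 1 < 2 * 2 ^ cs.length := by omega
        simpa [pow_succ, Nat.mul_comm] using this
      · have h1 : (2 * m + 1) % 2 = 1 := by omega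
        have h2 : (2 * m + 1) / 2 = m := by omega
        simp [pvSelect, h1, h2, hsel]

theorem pvNatInner_eq (cs : List Char) (m : Nat) :
    ((List.range cs.length).filter (fun k => m.testBit k)).map (fun k => cs.getD k ' ')
      = pvSelect cs m := by
  induction cs generalizing m with
  | nil => rfl
  | cons c cs ih =>
    rw [List.length_cons, List.range_succ_eq_map]
    rw [List.filter_cons]
    have hsucc : (List.map Nat.succ (List.range cs.length)).filter (fun k => m.testBit k)
        = List.map Nat.succ ((List.range cs.length).filter (fun k => (m / 2).testBit k)) := by
      rw [List.filter_map]
      congr 1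
      apply List.filter_congr
      intro k _
      simp [Function.comp, Nat.testBit_succ]
    by_cases h0 : m.testBit 0
    · have h1 : m % 2 = 1 := by
        have := Nat.testBit_zero m
        simpa [this] using h0
      simp only [h0, if_pos, hsucc, List.map_cons, List.map_map]
      have : ((List.range cs.length).filter (fun k => (m / 2).testBit k)).map
          ((fun k => (c :: cs).getD k ' ') ∘ Nat.succ)
          = ((List.range cs.length).filter (fun k => (m / 2).testBit k)).map
            (fun k => cs.getD k ' ') := by
        apply List.map_congr_left; intro k _; simp
      rw [this, ih]
      simp [pvSelect, h1]
    · have h1 : ¬ m % 2 = 1 := by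
        have := Nat.testBit_zero m
        simp [this] at h0
        omega
      simp only [h0, if_neg, hsucc, List.map_map, Bool.false_eq_true, not_false_iff]
      have : ((List.range cs.length).filter (fun k => (m / 2).testBit k)).map
          ((fun k => (c :: cs).getD k ' ') ∘ Nat.succ)
          = ((List.range cs.length).filter (fun k => (m / 2).testBit k)).map
            (fun k => cs.getD k ' ') := by
        apply List.map_congr_left; intro k _; simp
      rw [this, ih]
      simp [pvSelect, h1]

/-- A's inner bit-scanning loop extracts exactly `pvSelect`. -/
theorem pvInnerA_eq (s : String) (m : Nat) :
    (PySem.List.pyRange 0 (PySem.Str.len s) 1).foldl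
      (fun sub k =>
        if PySem.Int.band (m : Int) (1 <<< k.toNat) ≠ 0 then
          sub ++ [PySem.List.pyGetD s.toList k ' ']
        else sub) []
      = pvSelect s.toList m := by
  rw [PySem.List.foldl_append_ite
    (p := fun k : Int => PySem.Int.band (m : Int) (1 <<< k.toNat) ≠ 0)
    (f := fun k : Int => PySem.List.pyGetD s.toList k ' ')]
  have hlen : PySem.Str.len s = (s.toList.length : Int) := by simp
  rw [hlen, PySem.List.pyRange_zero_natCast, List.filter_map, List.map_map]
  have hpred : ∀ k : Nat,
      (decide (PySem.Int.band (m : Int) (1 <<< ((k : Int)).toNat) ≠ 0)) = m.testBit k := by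
    intro k
    have hk : ((k : Int)).toNat = k := Int.toNat_natCast k
    rw [hk, PySem.Int.band_natCast]
    by_cases hb : m.testBit k
    · have hnz : m &&& 1 <<< k ≠ 0 := by
        rw [Nat.shiftLeft_eq, one_mul, Nat.and_two_pow, hb]
        simp
        all_goals positivity
      simp [hb, hnz]
    · have hz : m &&& 1 <<< k = 0 := by
        rw [Nat.shiftLeft_eq, one_mul, Nat.and_two_pow]
        simp [hb]
      simp [hb, hz]
  have : (List.range s.toList.length).filter
        ((fun k : Int => decide (PySem.Int.band (m : Int) (1 <<< k.toNat) ≠ 0)) ∘ (fun k : Nat => (k : Int)))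
      = (List.range s.toList.length).filter (fun k => m.testBit k) := by
    apply List.filter_congr
    intro k _
    simpa using hpred k
  rw [this]
  have : ((List.range s.toList.length).filter (fun k => m.testBit k)).map
        ((fun k : Int => PySem.List.pyGetD s.toList k ' ') ∘ (fun k : Nat => (k : Int)))
      = ((List.range s.toList.length).filter (fun k => m.testBit k)).map
        (fun k => s.toList.getD k ' ') := by
    apply List.map_congr_left
    intro k _
    simp
  rw [this, pvNatInner_eq]
  simp

/-- Membership in A's accumulated set: exactly the nonempty sublists of `s`. -/
theorem pv_mem_Aset (s : String) (t : String) :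
    t ∈ ((PySem.List.pyRange 1 (2 ^ (PySem.Str.len s).toNat) 1).foldl
      (fun subsequences i =>
        PySem.Set.add subsequences (String.ofList
          ((PySem.List.pyRange 0 (PySem.Str.len s) 1).foldl
            (fun subsequence k =>
              if PySem.Int.band i (1 <<< k.toNat) ≠ 0 then
                subsequence ++ [PySem.List.pyGetD s.toList k ' ']
              else subsequence) [])))
      PySem.Set.empty)
    ↔ ∃ l, l.Sublist s.toList ∧ l ≠ [] ∧ t = String.ofList l := by
  rw [PySem.Set.mem_foldl_add]
  have hpow : ((2 : Int) ^ (PySem.Str.len s).toNat) = ((2 ^ s.toList.length : Nat) : Int) := by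
    have : (PySem.Str.len s).toNat = s.toList.length := by simp
    rw [this]; push_cast; ring
  constructor
  · rintro (h | ⟨i, hi, rfl⟩)
    · simp [PySem.Set.empty] at h
    · rw [PySem.List.mem_pyRange_one] at hi
      have h0 : 0 ≤ i := by omega
      have hi' : i = ((i.toNat : Nat) : Int) := by omega
      refine ⟨pvSelect s.toList i.toNat, pvSelect_sublist _ _, ?_, ?_⟩
      · intro hnil
        have hlt : i.toNat < 2 ^ s.toList.length := by
          rw [hpow] at hi; omega
        have := pvSelect_eq_nil hlt hnil
        omega
      · rw [hi', pvInnerA_eq]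
        congr 2
        all_goals omega
  · rintro ⟨l, hsub, hne, rfl⟩
    rcases pvSelect_surj s.toList l hsub with ⟨m, hm, hsel⟩
    have hm0 : m ≠ 0 := by
      rintro rfl
      rw [pvSelect_zero] at hsel
      exact hne hsel.symm
    refine Or.inr ⟨(m : Int), ?_, ?_⟩
    · rw [PySem.List.mem_pyRange_one, hpow]
      omega
    · rw [pvInnerA_eq, hsel]

/-- A's set is the dedup of the listed masks' strings, hence Nodup. -/
theorem pv_nodup_Aset (s : String) :
    List.Nodup ((PySem.List.pyRange 1 (2 ^ (PySem.Str.len s).toNat) 1).foldl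
      (fun subsequences i =>
        PySem.Set.add subsequences (String.ofList
          ((PySem.List.pyRange 0 (PySem.Str.len s) 1).foldl
            (fun subsequence k =>
              if PySem.Int.band i (1 <<< k.toNat) ≠ 0 then
                subsequence ++ [PySem.List.pyGetD s.toList k ' ']
              else subsequence) [])))
      PySem.Set.empty) := by
  rw [← PySem.Set.update_map_eq_foldl_add, PySem.Set.update_empty]
  exact PySem.Set.nodup_ofList _

/-- Invariant of B's loop: after consuming `cs` on top of prefix `p`, the set holds
exactly the (possibly empty) sublists of `p ++ cs`, without duplicates. -/
theorem pvB_inv (cs : List Char) (p : List Char) (r : PySem.Set String)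
    (hnd : List.Nodup r)
    (hmem : ∀ t, t ∈ r ↔ ∃ l, l.Sublist p ∧ t = String.ofList l) :
    List.Nodup (cs.foldl
      (fun result c =>
        PySem.Set.union result (PySem.Set.ofList (result.map (fun x => x ++ String.ofList [c])))) r)
    ∧ ∀ t, t ∈ (cs.foldl
      (fun result c =>
        PySem.Set.union result (PySem.Set.ofList (result.map (fun x => x ++ String.ofList [c])))) r)
        ↔ ∃ l, l.Sublist (p ++ cs) ∧ t = String.ofList l := by
  induction cs generalizing p r with
  | nil =>
    refine ⟨hnd, ?_⟩
    simpa using hmem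
  | cons c cs ih =>
    have hstep : ∀ t, t ∈ PySem.Set.union r (PySem.Set.ofList (r.map (fun x => x ++ String.ofList [c])))
        ↔ ∃ l, l.Sublist (p ++ [c]) ∧ t = String.ofList l := by
      intro t
      rw [PySem.Set.mem_union, PySem.Set.mem_ofList, List.mem_map]
      constructor
      · rintro (h | ⟨x, hx, rfl⟩)
        · rcases (hmem t).mp h with ⟨l, hl, rfl⟩
          exact ⟨l, hl.trans (List.sublist_append_left p [c]), rfl⟩
        · rcases (hmem x).mp hx with ⟨l, hl, rfl⟩
          refine ⟨l ++ [c], ?_, by simp⟩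
          exact hl.append (List.Sublist.refl [c])
      · rintro ⟨l, hl, rfl⟩
        rcases List.sublist_append_iff.mp hl with ⟨r₁, r₂, rfl, h₁, h₂⟩
        rcases List.sublist_singleton.mp h₂ with rfl | rfl
        · exact Or.inl ((hmem _).mpr ⟨r₁, by simpa using h₁, by simp⟩)
        · refine Or.inr ⟨String.ofList r₁, (hmem _).mpr ⟨r₁, h₁, rfl⟩, by simp⟩
    have hnd' : List.Nodup (PySem.Set.union r (PySem.Set.ofList (r.map (fun x => x ++ String.ofList [c])))) :=
      PySem.Set.nodup_union _ _ hnd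
    have := ih (p := p ++ [c]) (r := PySem.Set.union r (PySem.Set.ofList (r.map (fun x => x ++ String.ofList [c]))))
      hnd' hstep
    simpa using this

theorem pv_ofList_eq_empty_iff (l : List Char) : String.ofList l = "" ↔ l = [] := by
  constructor
  · intro h
    have := congrArg String.toList h
    simpa using this
  · rintro rfl; rfl

-- ===== VERDICT (by name: the statement is the Claim_ definition above) =====
theorem all_subsequences_spec : Claim_equal_all_subsequences := by
  intro s _
  show all_subsequences s = all_subsequences_alt s
  unfold all_subsequences all_subsequences_alt
  simp only []
  apply (PySem.List.sorted_id_eq_sorted_id_iff_perm _ _).mpr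
  have hA := pv_nodup_Aset s
  have hBinv := pvB_inv s.toList [] (PySem.Set.ofList [""]) (PySem.Set.nodup_ofList _)
    (by
      intro t
      rw [PySem.Set.mem_ofList]
      constructor
      · intro h
        simp at h
        exact ⟨[], List.Sublist.refl [], by simp [h]⟩
      · rintro ⟨l, hl, rfl⟩
        simp [List.sublist_nil.mp hl])
  refine (List.perm_ext_iff_of_nodup hA (PySem.Set.nodup_discard _ _ hBinv.1)).mpr ?_
  intro t
  rw [pv_mem_Aset, PySem.Set.mem_discard]
  rw [hBinv.2 t]
  constructor
  · rintro ⟨l, hsub, hne, rfl⟩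
    refine ⟨⟨l, by simpa using hsub, rfl⟩, ?_⟩
    simpa [pv_ofList_eq_empty_iff] using hne
  · rintro ⟨⟨l, hsub, rfl⟩, hne⟩
    refine ⟨l, by simpa using hsub, ?_, rfl⟩
    simpa [pv_ofList_eq_empty_iff] using hne
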